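-- pv_equiv track=rewrite | github.com/slackjawed12/codetest | 백준/Silver/4307. 개미/개미.py | get_min_max_time
-- ===== SOURCE A (Python) =====
-- def get_min_max_time(length: int, positions: list):
--     min_time = -1
--     max_time = -1
--     for pos in positions:
--         dist_to_start, dist_to_end = pos, length - pos
--         far = max(dist_to_start, dist_to_end)
--         near = min(dist_to_start, dist_to_end)
--         min_time = max(min_time, near)
--         max_time = max(max_time, far)
--
--     return [min_time, max_time]
-- ===== SOURCE B (Python) =====
-- def get_min_max_time(length: int, positions: list):
--     if not positions:
--         return [-1, -1]
--     # farthest exit time in closed form from the two extremes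
--     max_time = max(-1, max(positions), length - min(positions))
--     # nearest-exit time: partition ants by the plank midpoint; each ant left of
--     # (or at) the midpoint exits left in p steps, each ant right of it exits
--     # right in length - p steps, so only the extreme of each side matters
--     near = -1
--     left = [p for p in positions if 2 * p <= length]
--     if left:
--         near = max(near, max(left))
--     right = [p for p in positions if 2 * p > length]
--     if right:
--         near = max(near, length - min(right))
--     return [near, max_time]
-- ===== Notes on version B (the rewrite author's own statement) =====
-- stated objective: faster
-- what changed: Replaces A's per-element Python loop carrying two running maxima by closed-form extremes: max_time = max(-1, max(positions), length - min(positions)), and min_time from a midpoint partition (left-of-middle ants contribute max(left), right-of-middle ants contribute length - min(right)), pushing all per-element work into C-level builtins (max/min/filter comprehensions).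
import Mathlib
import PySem

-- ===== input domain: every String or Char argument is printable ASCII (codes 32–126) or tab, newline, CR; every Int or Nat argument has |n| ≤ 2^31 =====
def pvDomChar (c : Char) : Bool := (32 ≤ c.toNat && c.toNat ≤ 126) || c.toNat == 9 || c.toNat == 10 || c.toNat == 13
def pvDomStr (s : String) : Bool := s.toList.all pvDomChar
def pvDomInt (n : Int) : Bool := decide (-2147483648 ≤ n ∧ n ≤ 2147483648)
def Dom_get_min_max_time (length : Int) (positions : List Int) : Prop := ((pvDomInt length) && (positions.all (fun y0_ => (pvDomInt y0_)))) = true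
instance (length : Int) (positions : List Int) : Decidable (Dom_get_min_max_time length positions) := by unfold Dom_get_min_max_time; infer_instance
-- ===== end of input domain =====

-- B replaces A's per-element running-maximum loop by closed-form extremes (max_time from
-- max/min of positions, min_time from a midpoint partition over C-level builtins); objective: faster (constant factor, measured).

-- ===== PORT A =====
def get_min_max_time (length : Int) (positions : List Int) : List Int :=
  let s := positions.foldl (fun (st : Int × Int) pos =>
    let dist_to_start := pos
    let dist_to_end := length - pos
    let far := max dist_to_start dist_to_end
    let near := min dist_to_start dist_to_end
    (max st.1 near, max st.2 far)) (-1, -1)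
  [s.1, s.2]

-- ===== PORT B =====
-- max(positions)/min(positions) ported via PySem.List.max?/min?; the branches guarantee
-- the lists are nonempty, so the .getD (-1) defaults are unreachable.
def get_min_max_time_alt (length : Int) (positions : List Int) : List Int :=
  if positions.isEmpty then [-1, -1]
  else
    let max_time := max (-1) (max ((PySem.List.max? positions (fun y => y)).getD (-1))
      (length - (PySem.List.min? positions (fun y => y)).getD (-1)))
    let near0 : Int := -1
    let left := positions.filter (fun p => decide (2 * p ≤ length))
    let near1 := if left.isEmpty then near0
      else max near0 ((PySem.List.max? left (fun y => y)).getD (-1))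
    let right := positions.filter (fun p => decide (length < 2 * p))
    let near2 := if right.isEmpty then near1
      else max near1 (length - (PySem.List.min? right (fun y => y)).getD (-1))
    [near2, max_time]

-- ===== PRECONDITION & SPEC =====
def Spec_get_min_max_time (length : Int) (positions : List Int) (out : List Int) : Prop := out = get_min_max_time_alt length positions
instance (length : Int) (positions : List Int) (out : List Int) : Decidable (Spec_get_min_max_time length positions out) := by unfold Spec_get_min_max_time; infer_instance

-- ===== CLAIM (what is proved, stated in full; the proofs are below) =====
def Claim_equal_get_min_max_time : Prop := ∀ (length : Int) (positions : List Int), Dom_get_min_max_time length positions → Spec_get_min_max_time length positions (get_min_max_time length positions)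

-- ===== LEMMAS AND PROOFS =====

-- A's paired running-maximum loop computes, componentwise, running maxima of the mapped
-- near/far lists.
theorem pair_foldl_eq (length : Int) (positions : List Int) : ∀ (a b : Int),
    positions.foldl (fun (st : Int × Int) pos =>
      (max st.1 (min pos (length - pos)), max st.2 (max pos (length - pos)))) (a, b)
    = ((positions.map (fun p => min p (length - p))).foldl max a,
       (positions.map (fun p => max p (length - p))).foldl max b) := by
  induction positions with
  | nil => intro a b; simp
  | cons x t ih => intro a b; simp [List.foldl_cons, ih]

theorem foldl_max_init (l : List Int) : ∀ (a b : Int),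
    l.foldl max (max a b) = max a (l.foldl max b) := by
  induction l with
  | nil => intro a b; simp
  | cons x t ih =>
    intro a b
    simp only [List.foldl_cons]
    rw [max_assoc, ih]

theorem le_foldl_max' (l : List Int) : ∀ (a : Int), a ≤ l.foldl max a := by
  induction l with
  | nil => intro a; simp
  | cons x t ih =>
    intro a
    exact le_trans (le_max_left a x) (ih _)

-- the far-distance fold in terms of the extremes of the list
theorem far_foldl (L : Int) (t : List Int) : ∀ (p q : Int),
    (t.map (fun x => max x (L - x))).foldl max (max p (L - q))
    = max (t.foldl max p) (L - t.foldl min q) := by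
  induction t with
  | nil => intro p q; simp
  | cons x t ih =>
    intro p q
    simp only [List.map_cons, List.foldl_cons]
    have h : max (max p (L - q)) (max x (L - x)) = max (max p x) (L - min q x) := by
      omega
    rw [h, ih]

-- the near-distance fold in terms of the midpoint partition
theorem near_foldl (L : Int) (l : List Int) : ∀ (b c : Int),
    (l.map (fun x => min x (L - x))).foldl max (max b (L - c))
    = max ((l.filter (fun p => decide (2 * p ≤ L))).foldl max b)
          (L - (l.filter (fun p => decide (L < 2 * p))).foldl min c) := by
  induction l with
  | nil => intro b c; simp
  | cons x t ih =>
    intro b c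
    simp only [List.map_cons, List.foldl_cons, List.filter_cons]
    by_cases hx : 2 * x ≤ L
    · have h1 : max (max b (L - c)) (min x (L - x)) = max (max b x) (L - c) := by omega
      simp only [hx, decide_true, not_lt.mpr hx, decide_false]
      simp only [if_true, if_false, Bool.false_eq_true, List.foldl_cons]
      rw [h1, ih]
    · have hx' : L < 2 * x := by omega
      have h1 : max (max b (L - c)) (min x (L - x)) = max b (L - min c x) := by omega
      simp only [not_le.mp hx, decide_true, hx, decide_false]
      simp only [if_true, if_false, Bool.false_eq_true, List.foldl_cons]
      rw [h1, ih]

-- if every element of l is ≤ C, the min-fold seeded with C is the min of the list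
theorem foldl_min_seed (l : List Int) (r C : Int) (hr : r ≤ C) :
    (r :: l).foldl min C = l.foldl min r := by
  simp only [List.foldl_cons, min_eq_right hr]

-- ===== VERDICT (by name: the statement is the Claim_ definition above) =====
theorem get_min_max_time_spec : Claim_equal_get_min_max_time := by
  intro L positions hdom
  unfold Spec_get_min_max_time get_min_max_time get_min_max_time_alt
  have hL : L ≤ 2147483648 := by
    unfold Dom_get_min_max_time pvDomInt at hdom
    simp only [Bool.and_eq_true, decide_eq_true_eq] at hdom
    exact hdom.1.2
  have hmem : ∀ p ∈ positions, p ≤ 2147483648 := by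
    intro p hp
    unfold Dom_get_min_max_time pvDomInt at hdom
    simp only [Bool.and_eq_true, List.all_eq_true, decide_eq_true_eq] at hdom
    exact (hdom.2 p hp).2
  cases positions with
  | nil => simp
  | cons h t =>
    simp only [List.isEmpty_cons, if_false, Bool.false_eq_true]
    rw [show (fun (st : Int × Int) pos =>
        let dist_to_start := pos
        let dist_to_end := L - pos
        let far := max dist_to_start dist_to_end
        let near := min dist_to_start dist_to_end
        (max st.1 near, max st.2 far))
      = (fun (st : Int × Int) pos =>
        (max st.1 (min pos (L - pos)), max st.2 (max pos (L - pos)))) from rfl]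
    rw [pair_foldl_eq]
    -- far component
    have hfar : ((h :: t).map (fun p => max p (L - p))).foldl max (-1)
        = max (-1) (max ((PySem.List.max? (h :: t) (fun y => y)).getD (-1))
            (L - (PySem.List.min? (h :: t) (fun y => y)).getD (-1))) := by
      rw [PySem.List.max?_id_cons, PySem.List.min?_id_cons]
      simp only [Option.getD_some, List.map_cons, List.foldl_cons]
      have h1 : max (-1 : Int) (max h (L - h)) = max (max (-1) h) (L - h) := by omega
      rw [h1, far_foldl, foldl_max_init, max_assoc]
    -- near component
    set C : Int := 4294967297 with hC
    have hseed : max (-1 : Int) (L - C) = -1 := by omega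
    have hnear := near_foldl L (h :: t) (-1) C
    rw [hseed] at hnear
    have hnear1 : ((h :: t).filter (fun p => decide (2 * p ≤ L))).foldl max (-1)
        = (if ((h :: t).filter (fun p => decide (2 * p ≤ L))).isEmpty then (-1 : Int)
           else max (-1) ((PySem.List.max? ((h :: t).filter (fun p => decide (2 * p ≤ L))) (fun y => y)).getD (-1))) := by
      cases hl : (h :: t).filter (fun p => decide (2 * p ≤ L)) with
      | nil => simp
      | cons a at_ =>
        rw [PySem.List.max?_id_cons]
        simp only [List.isEmpty_cons, if_false, Bool.false_eq_true, Option.getD_some,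
          List.foldl_cons]
        rw [← foldl_max_init]
    cases hr : (h :: t).filter (fun p => decide (L < 2 * p)) with
    | nil =>
      rw [hr] at hnear
      simp only [List.foldl_nil] at hnear
      have hLC : L - C ≤ (-1 : Int) := by omega
      have hge : (-1 : Int) ≤ ((h :: t).filter (fun p => decide (2 * p ≤ L))).foldl max (-1) :=
        le_foldl_max' _ _
      rw [max_eq_left (le_trans hLC hge)] at hnear
      simp only [List.cons.injEq, and_true]
      constructor
      · rw [hnear, hnear1]; simp
      · exact hfar
    | cons r rt =>
      rw [hr] at hnear
      have hrC : r ≤ C := by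
        have : r ∈ (h :: t).filter (fun p => decide (L < 2 * p)) := by rw [hr]; simp
        have := hmem r (List.mem_of_mem_filter this)
        omega
      rw [foldl_min_seed rt r C hrC] at hnear
      simp only [List.cons.injEq, and_true]
      constructor
      · rw [hnear, hnear1]
        rw [PySem.List.min?_id_cons]
        simp
      · exact hfar
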